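-- pv_equiv track=rewrite | github.com/sebagiulia/Word-Search-Creator | TPPartePy.py | con_choque_valido
-- ===== SOURCE A (Python) =====
-- def con_choque_valido(pX, pY, palabra, largoPalabra, tablero, direccion, sentido):
--     if direccion == 1:
--         if sentido == 1:
--             for x in range(largoPalabra):
--                 if tablero[pY][pX + x] != "." and tablero[pY][pX + x] != palabra[x]:
--                     return True
--         else:
--             for x in range(largoPalabra):
--                 if tablero[pY][pX - x] != "." and tablero[pY][pX - x] != palabra[x]:
--                     return True
--     elif direccion == 2:
--         if sentido == 1:
--             for x in range(largoPalabra):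
--                 if tablero[pY + x][pX] != "." and tablero[pY + x][pX] != palabra[x]:
--                         return True
--         else:
--             for x in range(largoPalabra):
--                 if tablero[pY - x][pX] != "." and tablero[pY - x][pX] != palabra[x]:
--                         return True
--     elif direccion == 3:
--         if sentido == 1:
--             for x in range(largoPalabra):
--                 if tablero[pY + x][pX + x] != "." and tablero[pY + x][pX + x] != palabra[x]:
--                         return True
--         else:
--             for x in range(largoPalabra):
--                 if tablero[pY - x][pX - x] != "." and tablero[pY - x][pX - x] != palabra[x]:
--                         return True
--     elif direccion == 4:
--         if sentido == 1:
--             for x in range(largoPalabra):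
--                 if tablero[pY - x][pX + x] != "." and tablero[pY - x][pX + x] != palabra[x]:
--                         return True
--         else:
--             for x in range(largoPalabra):
--                 if tablero[pY + x][pX - x] != "." and tablero[pY + x][pX - x] != palabra[x]:
--                         return True
--     return False
-- ===== SOURCE B (Python) =====
-- def con_choque_valido(pX, pY, palabra, largoPalabra, tablero, direccion, sentido):
--     if not 1 <= direccion <= 4:
--         return False
--     dx, dy = [(1, 0), (0, 1), (1, 1), (1, -1)][direccion - 1]
--     if sentido != 1:
--         dx, dy = -dx, -dy
--     x, y, resto, n = pX, pY, palabra, largoPalabra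
--     while n > 0:
--         c = tablero[y][x]
--         if c != "." and c != resto[0]:
--             return True
--         x, y, resto, n = x + dx, y + dy, resto[1:], n - 1
--     return False
-- ===== Notes on version B (the rewrite author's own statement) =====
-- stated objective: simpler
-- what changed: A's eight copy-pasted index-based for-loops become one while-loop over a different state: a moving cursor (x,y) stepped by a direction vector and the word consumed by slicing (resto[0]/resto[1:]) instead of indexing palabra[x]; the direction vector is read off a positional table and sign-flipped for the sense.
import Mathlib
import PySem

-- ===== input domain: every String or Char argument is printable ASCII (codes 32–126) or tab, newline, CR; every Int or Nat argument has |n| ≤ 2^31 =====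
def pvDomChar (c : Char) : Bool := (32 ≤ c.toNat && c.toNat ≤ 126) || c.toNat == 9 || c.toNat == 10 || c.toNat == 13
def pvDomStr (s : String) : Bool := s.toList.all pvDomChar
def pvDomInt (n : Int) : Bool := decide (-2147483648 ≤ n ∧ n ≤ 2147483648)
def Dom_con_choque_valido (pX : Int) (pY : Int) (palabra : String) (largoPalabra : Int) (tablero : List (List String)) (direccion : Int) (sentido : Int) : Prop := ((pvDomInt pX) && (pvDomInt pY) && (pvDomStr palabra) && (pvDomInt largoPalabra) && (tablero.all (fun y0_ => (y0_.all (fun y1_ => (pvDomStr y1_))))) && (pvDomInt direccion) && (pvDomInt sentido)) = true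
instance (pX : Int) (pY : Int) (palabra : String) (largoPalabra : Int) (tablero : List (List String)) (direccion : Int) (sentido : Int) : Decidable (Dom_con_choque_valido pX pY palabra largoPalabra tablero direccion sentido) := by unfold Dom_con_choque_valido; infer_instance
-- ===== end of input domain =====

-- B replaces A's eight copy-pasted index-based loops by one while-loop over a moving cursor
-- (x, y) stepped by a direction vector, consuming the word by slicing (objective: simpler).

-- ===== PORT A =====
-- tablero[r][c] as an Option (none = IndexError); shared indexing primitive
def pyCell (tablero : List (List String)) (r c : Int) : Option String :=
  (PySem.List.pyGet? tablero r).bind (fun row => PySem.List.pyGet? row c)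

-- one of A's 'for x in range(largoPalabra)' loops over the cell expression of its branch;
-- early 'return True' kept; 'none' (where Python raises IndexError) yields false, outside Pre_
def loopA (cell : Nat → Option String) (pal : String) : Nat → Nat → Bool
  | 0, _ => false
  | fuel + 1, x =>
    match cell x with
    | none => false
    | some c =>
      if c = "." then loopA cell pal fuel (x + 1)
      else
        match PySem.Str.pyGet? pal (x : Int) with
        | none => false
        | some p => if c = String.ofList [p] then loopA cell pal fuel (x + 1) else true

def con_choque_valido (pX : Int) (pY : Int) (palabra : String) (largoPalabra : Int) (tablero : List (List String)) (direccion : Int) (sentido : Int) : Bool :=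
  if direccion = 1 then
    if sentido = 1 then
      loopA (fun x => pyCell tablero pY (pX + (x : Int))) palabra largoPalabra.toNat 0
    else
      loopA (fun x => pyCell tablero pY (pX - (x : Int))) palabra largoPalabra.toNat 0
  else if direccion = 2 then
    if sentido = 1 then
      loopA (fun x => pyCell tablero (pY + (x : Int)) pX) palabra largoPalabra.toNat 0
    else
      loopA (fun x => pyCell tablero (pY - (x : Int)) pX) palabra largoPalabra.toNat 0
  else if direccion = 3 then
    if sentido = 1 then
      loopA (fun x => pyCell tablero (pY + (x : Int)) (pX + (x : Int))) palabra largoPalabra.toNat 0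
    else
      loopA (fun x => pyCell tablero (pY - (x : Int)) (pX - (x : Int))) palabra largoPalabra.toNat 0
  else if direccion = 4 then
    if sentido = 1 then
      loopA (fun x => pyCell tablero (pY - (x : Int)) (pX + (x : Int))) palabra largoPalabra.toNat 0
    else
      loopA (fun x => pyCell tablero (pY + (x : Int)) (pX - (x : Int))) palabra largoPalabra.toNat 0
  else false

-- ===== PORT B =====
-- Source B's while-loop: cursor (x, y) advanced by (dx, dy), word consumed by slicing;
-- 'none' board cell / empty resto (where Python raises IndexError) yields false, outside Pre_
def scanB (tab : List (List String)) (dx dy : Int) : Nat → Int → Int → List Char → Bool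
  | 0, _, _, _ => false
  | n + 1, x, y, resto =>
    match pyCell tab y x with
    | none => false
    | some c =>
      if c = "." then scanB tab dx dy n (x + dx) (y + dy) resto.tail
      else
        match resto with
        | [] => false
        | p :: rest => if c = String.ofList [p] then scanB tab dx dy n (x + dx) (y + dy) rest else true

def con_choque_valido_alt (pX : Int) (pY : Int) (palabra : String) (largoPalabra : Int) (tablero : List (List String)) (direccion : Int) (sentido : Int) : Bool :=
  if 1 ≤ direccion ∧ direccion ≤ 4 then
    match PySem.List.pyGet? [((1 : Int), (0 : Int)), (0, 1), (1, 1), (1, -1)] (direccion - 1) with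
    | none => false   -- unreachable under the guard
    | some (bx, by0) =>
      let d : Int × Int := if sentido ≠ 1 then (-bx, -by0) else (bx, by0)
      scanB tablero d.1 d.2 largoPalabra.toNat pX pY palabra.toList
  else false

-- ===== PRECONDITION & SPEC =====
-- helpers for stating Pre_ (used by neither port)
def pvPaso (direccion sentido : Int) : Int × Int :=
  let s : Int := if sentido = 1 then 1 else -1
  if direccion = 1 then (s, 0)
  else if direccion = 2 then (0, s)
  else if direccion = 3 then (s, s)
  else (s, -s)

-- position x returns True in A's scan (conflict)
def pvStop (tab : List (List String)) (pal : String) (pX pY dx dy : Int) (x : Nat) : Bool :=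
  match pyCell tab (pY + (x : Int) * dy) (pX + (x : Int) * dx) with
  | none => false
  | some c =>
    decide (c ≠ ".") &&
      (match PySem.Str.pyGet? pal (x : Int) with
       | none => false
       | some p => decide (c ≠ String.ofList [p]))

-- position x raises in A's scan (board cell out of range, or palabra exhausted at a non-'.' cell)
def pvBad (tab : List (List String)) (pal : String) (pX pY dx dy : Int) (x : Nat) : Bool :=
  match pyCell tab (pY + (x : Int) * dy) (pX + (x : Int) * dx) with
  | none => true
  | some c => decide (c ≠ ".") && (PySem.Str.pyGet? pal (x : Int)).isNone

-- past this many steps a moving coordinate has necessarily left the board, so the scan has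
-- already raised or stopped; capping the quantifier here excludes nothing and keeps Pre_ decidable
def pvBound (tablero : List (List String)) : Nat :=
  2 * (tablero.length + (tablero.map List.length).foldr max 0) + 3

-- Pre_ excludes exactly the inputs on which Python A raises IndexError: some visited position
-- raises (out-of-range cell, or palabra exhausted at a non-'.' cell) before any conflicting
-- position has made A return True.  A returns a value on every input admitted here.
def Pre_con_choque_valido (pX : Int) (pY : Int) (palabra : String) (largoPalabra : Int) (tablero : List (List String)) (direccion : Int) (sentido : Int) : Prop :=
  (1 ≤ direccion ∧ direccion ≤ 4) →
    ∀ x < min largoPalabra.toNat (pvBound tablero),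
      (∀ y < x, pvStop tablero palabra pX pY (pvPaso direccion sentido).1 (pvPaso direccion sentido).2 y = false) →
      pvBad tablero palabra pX pY (pvPaso direccion sentido).1 (pvPaso direccion sentido).2 x = false
instance (pX : Int) (pY : Int) (palabra : String) (largoPalabra : Int) (tablero : List (List String)) (direccion : Int) (sentido : Int) : Decidable (Pre_con_choque_valido pX pY palabra largoPalabra tablero direccion sentido) := by unfold Pre_con_choque_valido; infer_instance

def pvWitness_con_choque_valido : Int × Int × String × Int × List (List String) × Int × Int :=
  (0, 0, "ab", 2, [["a", "."], [".", "."]], 1, 1)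

def Spec_con_choque_valido (pX : Int) (pY : Int) (palabra : String) (largoPalabra : Int) (tablero : List (List String)) (direccion : Int) (sentido : Int) (out : Bool) : Prop := out = con_choque_valido_alt pX pY palabra largoPalabra tablero direccion sentido
instance (pX : Int) (pY : Int) (palabra : String) (largoPalabra : Int) (tablero : List (List String)) (direccion : Int) (sentido : Int) (out : Bool) : Decidable (Spec_con_choque_valido pX pY palabra largoPalabra tablero direccion sentido out) := by unfold Spec_con_choque_valido; infer_instance

-- ===== CLAIM =====
def Claim_equal_con_choque_valido : Prop := ∀ (pX : Int) (pY : Int) (palabra : String) (largoPalabra : Int) (tablero : List (List String)) (direccion : Int) (sentido : Int), Dom_con_choque_valido pX pY palabra largoPalabra tablero direccion sentido → Pre_con_choque_valido pX pY palabra largoPalabra tablero direccion sentido → Spec_con_choque_valido pX pY palabra largoPalabra tablero direccion sentido (con_choque_valido pX pY palabra largoPalabra tablero direccion sentido)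

-- ===== LEMMAS AND PROOFS =====
lemma pyCell_congr (tab : List (List String)) {r r' c c' : Int} (hr : r = r') (hc : c = c') :
    pyCell tab r c = pyCell tab r' c' := by rw [hr, hc]

-- the core invariant: A's index-x loop equals B's cursor scan when B's state is
-- (pX + x*dx, pY + x*dy, palabra.toList.drop x)
lemma loopA_eq_scanB (tab : List (List String)) (pal : String) (pX pY dx dy : Int)
    (cell : Nat → Option String)
    (h : ∀ i : Nat, cell i = pyCell tab (pY + (i : Int) * dy) (pX + (i : Int) * dx)) :
    ∀ fuel x, loopA cell pal fuel x
      = scanB tab dx dy fuel (pX + (x : Int) * dx) (pY + (x : Int) * dy) (pal.toList.drop x) := by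
  intro fuel
  induction fuel with
  | zero => intro x; rfl
  | succ n ih =>
    intro x
    have hx1 : pX + (x : Int) * dx + dx = pX + ((x + 1 : Nat) : Int) * dx := by push_cast; ring
    have hy1 : pY + (x : Int) * dy + dy = pY + ((x + 1 : Nat) : Int) * dy := by push_cast; ring
    have hp : PySem.Str.pyGet? pal (x : Int) = (pal.toList.drop x).head? := by
      simp [List.head?_drop]
    simp only [loopA, scanB, h x]
    cases hcell : pyCell tab (pY + (x : Int) * dy) (pX + (x : Int) * dx) with
    | none => rfl
    | some c =>
      by_cases hc : c = "."
      · simp only [if_pos hc, ih (x + 1), hx1, hy1, List.tail_drop]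
      · simp only [if_neg hc, hp]
        cases hd : pal.toList.drop x with
        | nil => rfl
        | cons p rest =>
          have hrest : rest = pal.toList.drop (x + 1) := by
            rw [← List.tail_drop, hd]; rfl
          simp only [List.head?_cons]
          by_cases he : c = String.ofList [p]
          · simp only [if_pos he, ih (x + 1), hx1, hy1, hrest]
          · simp only [if_neg he]

-- cast B's start state to the x = 0 instance of the invariant
lemma scanB_start (tab : List (List String)) (pal : String) (pX pY dx dy : Int)
    (cell : Nat → Option String)
    (h : ∀ i : Nat, cell i = pyCell tab (pY + (i : Int) * dy) (pX + (i : Int) * dx)) (fuel : Nat) :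
    loopA cell pal fuel 0 = scanB tab dx dy fuel pX pY pal.toList := by
  have := loopA_eq_scanB tab pal pX pY dx dy cell h fuel 0
  simpa using this

-- ===== VERDICT =====
theorem con_choque_valido_spec : Claim_equal_con_choque_valido := by
  intro pX pY palabra largoPalabra tablero direccion sentido _ _
  unfold Spec_con_choque_valido con_choque_valido con_choque_valido_alt
  by_cases h1 : direccion = 1
  · subst h1
    by_cases hs : sentido = 1
    · have h := scanB_start tablero palabra pX pY 1 0
        (fun i => pyCell tablero pY (pX + (i : Int)))
        (fun i => pyCell_congr tablero (by ring) (by ring)) largoPalabra.toNat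
      simpa [hs, PySem.List.pyGet?, PySem.List.pyIdx?] using h
    · have h := scanB_start tablero palabra pX pY (-1) 0
        (fun i => pyCell tablero pY (pX - (i : Int)))
        (fun i => pyCell_congr tablero (by ring) (by ring)) largoPalabra.toNat
      simpa [hs, PySem.List.pyGet?, PySem.List.pyIdx?] using h
  · by_cases h2 : direccion = 2
    · subst h2
      by_cases hs : sentido = 1
      · have h := scanB_start tablero palabra pX pY 0 1
          (fun i => pyCell tablero (pY + (i : Int)) pX)
          (fun i => pyCell_congr tablero (by ring) (by ring)) largoPalabra.toNat
        simpa [hs, PySem.List.pyGet?, PySem.List.pyIdx?] using h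
      · have h := scanB_start tablero palabra pX pY 0 (-1)
          (fun i => pyCell tablero (pY - (i : Int)) pX)
          (fun i => pyCell_congr tablero (by ring) (by ring)) largoPalabra.toNat
        simpa [hs, PySem.List.pyGet?, PySem.List.pyIdx?] using h
    · by_cases h3 : direccion = 3
      · subst h3
        by_cases hs : sentido = 1
        · have h := scanB_start tablero palabra pX pY 1 1
            (fun i => pyCell tablero (pY + (i : Int)) (pX + (i : Int)))
            (fun i => pyCell_congr tablero (by ring) (by ring)) largoPalabra.toNat
          simpa [hs, PySem.List.pyGet?, PySem.List.pyIdx?] using h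
        · have h := scanB_start tablero palabra pX pY (-1) (-1)
            (fun i => pyCell tablero (pY - (i : Int)) (pX - (i : Int)))
            (fun i => pyCell_congr tablero (by ring) (by ring)) largoPalabra.toNat
          simpa [hs, PySem.List.pyGet?, PySem.List.pyIdx?] using h
      · by_cases h4 : direccion = 4
        · subst h4
          by_cases hs : sentido = 1
          · have h := scanB_start tablero palabra pX pY 1 (-1)
              (fun i => pyCell tablero (pY - (i : Int)) (pX + (i : Int)))
              (fun i => pyCell_congr tablero (by ring) (by ring)) largoPalabra.toNat
            simpa [hs, PySem.List.pyGet?, PySem.List.pyIdx?] using h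
          · have h := scanB_start tablero palabra pX pY (-1) 1
              (fun i => pyCell tablero (pY + (i : Int)) (pX - (i : Int)))
              (fun i => pyCell_congr tablero (by ring) (by ring)) largoPalabra.toNat
            simpa [hs, PySem.List.pyGet?, PySem.List.pyIdx?] using h
        · have hg : ¬ (1 ≤ direccion ∧ direccion ≤ 4) := by omega
          simp [h1, h2, h3, h4, hg]
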